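-- pv_equiv track=rewrite | github.com/Arjunp24/web-crawler | url_canonicalization.py | lower_case_domain
-- ===== SOURCE A (Python) =====
-- def lower_case_domain(url):
--     x = [y for y in url]
--     index1 = 0
--     slashes = 0
--     while index1 < len(url):
--         if x[index1] == '/':
--             if slashes + 1 == 3:
--                 break
--             slashes += 1
--         else:
--             x[index1] = x[index1].lower()
--         index1 += 1
--
--     return ''.join(xy for xy in x)
-- ===== SOURCE B (Python) =====
-- def lower_case_domain(url):
--     count = 0
--     for i, ch in enumerate(url):
--         if ch == '/':
--             count += 1
--             if count == 3:
--                 return url[:i].lower() + url[i:]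
--     return url.lower()
-- ===== Notes on version B (the rewrite author's own statement) =====
-- stated objective: simpler
-- what changed: B locates the index of the third slash in one counting pass and returns the bulk-lowered prefix concatenated with the untouched suffix (lowering the whole string when there is no third slash), replacing A's in-place per-character list mutation and join.
import Mathlib
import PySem

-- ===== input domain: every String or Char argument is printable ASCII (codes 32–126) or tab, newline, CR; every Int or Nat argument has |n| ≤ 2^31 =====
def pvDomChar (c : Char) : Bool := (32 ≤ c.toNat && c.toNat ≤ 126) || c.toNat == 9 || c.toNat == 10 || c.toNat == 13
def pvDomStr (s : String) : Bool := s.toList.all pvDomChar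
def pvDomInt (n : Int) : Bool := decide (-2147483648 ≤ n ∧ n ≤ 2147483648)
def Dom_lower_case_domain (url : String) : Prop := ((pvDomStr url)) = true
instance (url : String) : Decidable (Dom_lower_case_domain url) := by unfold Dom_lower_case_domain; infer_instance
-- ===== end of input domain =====

-- B replaces A's in-place per-character lowering loop with "find the third '/', then
-- bulk-lower the prefix and append the untouched suffix" (objective: simpler).

-- ===== PORT A =====
-- A's while loop: walk x by index, lowering each non-'/' char in place, break at the third '/'.
def pvLoopA (x : List Char) (index1 slashes : Nat) : List Char :=
  if h : index1 < x.length then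
    if x[index1] = '/' then
      if slashes + 1 = 3 then x
      else pvLoopA x (index1 + 1) (slashes + 1)
    else pvLoopA (x.set index1 (PySem.Chars.lowerChar x[index1])) (index1 + 1) slashes
  else x
termination_by x.length - index1
decreasing_by all_goals simp_all; omega

def lower_case_domain (url : String) : String :=
  String.ofList (pvLoopA url.toList 0 0)

-- ===== PORT B =====
-- B's for loop over enumerate(url): count slashes; at the third, return url[:i].lower() + url[i:].
def pvLoopB (url : List Char) (rest : List Char) (i count : Nat) : List Char :=
  match rest with
  | [] => PySem.Chars.lower url
  | c :: rs =>
    if c = '/' then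
      if count + 1 = 3 then PySem.Chars.lower (url.take i) ++ url.drop i
      else pvLoopB url rs (i + 1) (count + 1)
    else pvLoopB url rs (i + 1) count

def lower_case_domain_alt (url : String) : String :=
  String.ofList (pvLoopB url.toList url.toList 0 0)

-- ===== PRECONDITION & SPEC =====
def Spec_lower_case_domain (url : String) (out : String) : Prop := out = lower_case_domain_alt url
instance (url : String) (out : String) : Decidable (Spec_lower_case_domain url out) := by unfold Spec_lower_case_domain; infer_instance

-- ===== CLAIM (what is proved, stated in full; the proofs are below) =====
def Claim_equal_lower_case_domain : Prop := ∀ (url : String), Dom_lower_case_domain url → Spec_lower_case_domain url (lower_case_domain url)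

-- ===== LEMMAS AND PROOFS =====
-- Common characterisation: processing suffix `rest` with `s` slashes already seen.
def pvSpecG (rest : List Char) (s : Nat) : List Char :=
  match rest with
  | [] => []
  | c :: cs =>
    if c = '/' then
      if s + 1 = 3 then c :: cs else c :: pvSpecG cs (s + 1)
    else PySem.Chars.lowerChar c :: pvSpecG cs s

theorem pvLoopA_eq (rest pre : List Char) (s : Nat) :
    pvLoopA (pre ++ rest) pre.length s = pre ++ pvSpecG rest s := by
  induction rest generalizing pre s with
  | nil => simp [pvLoopA, pvSpecG]
  | cons c cs ih =>
    rw [pvLoopA]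
    have hlt : pre.length < (pre ++ c :: cs).length := by simp
    have hget : (pre ++ c :: cs)[pre.length] = c := by
      simp [List.getElem_append_right]
    rw [dif_pos hlt]
    simp only [hget]
    by_cases hc : c = '/'
    · subst hc
      simp only [if_pos rfl, pvSpecG]
      by_cases hs : s + 1 = 3
      · simp [hs]
      · rw [if_neg hs, if_neg hs]
        have := ih (pre ++ ['/']) (s + 1)
        simpa using this
    · rw [if_neg hc]
      have hset : (pre ++ c :: cs).set pre.length (PySem.Chars.lowerChar c)
          = (pre ++ [PySem.Chars.lowerChar c]) ++ cs := by
        simp [List.set_append]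
      rw [hset]
      have := ih (pre ++ [PySem.Chars.lowerChar c]) s
      simp only [List.length_append, List.length_cons, List.length_nil] at this ⊢
      rw [this]
      simp [pvSpecG, hc]

theorem pvLoopB_eq (rest pre : List Char) (s : Nat) :
    pvLoopB (pre ++ rest) rest pre.length s = PySem.Chars.lower pre ++ pvSpecG rest s := by
  induction rest generalizing pre s with
  | nil => simp [pvLoopB, pvSpecG]
  | cons c cs ih =>
    rw [pvLoopB]
    by_cases hc : c = '/'
    · subst hc
      simp only [if_pos rfl, pvSpecG]
      by_cases hs : s + 1 = 3
      · rw [if_pos hs, if_pos hs]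
        simp
      · rw [if_neg hs, if_neg hs]
        have := ih (pre ++ ['/']) (s + 1)
        simp only [List.length_append, List.length_cons, List.length_nil,
          List.append_assoc, List.cons_append, List.nil_append] at this
        rw [this]
        simp [PySem.Chars.lower, PySem.Chars.lowerChar, PySem.Chars.isupper]
    · rw [if_neg hc]
      have := ih (pre ++ [c]) s
      simp only [List.length_append, List.length_cons, List.length_nil,
        List.append_assoc, List.cons_append, List.nil_append] at this
      rw [this]
      simp [PySem.Chars.lower, pvSpecG, hc]

-- ===== VERDICT (by name: the statement is the Claim_ definition above) =====
theorem lower_case_domain_spec : Claim_equal_lower_case_domain := by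
  intro url _
  unfold Spec_lower_case_domain lower_case_domain lower_case_domain_alt
  have hA := pvLoopA_eq url.toList [] 0
  have hB := pvLoopB_eq url.toList [] 0
  simp only [List.nil_append, List.length_nil] at hA hB
  rw [hA, hB]
  simp [PySem.Chars.lower]
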